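-- pv_equiv track=rewrite | github.com/ohmema/interview | python/interview/string/valid_ip_address.py | generate_ip_addresses
-- ===== SOURCE A (Python) =====
-- def generate_ip_addresses(ip):
--
--
--     if len(ip) <= 0:
--         return [""]  # Struggling point
--
--     if len(ip) == 1:
--         return [ip]
--
-- #    if len(ip) == 2:
-- #        return [ip]
-- #
-- #    if len(ip) == 3:
-- #        return [ip]
--
--
--     ips1 = generate_ip_addresses(ip[1:])
--     ips2 = generate_ip_addresses(ip[2:])
--     ips3 = generate_ip_addresses(ip[3:])
--
--     ip1 = ip[:1]
--     ip2 = ip[:2]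
--     ip3 = ip[:3]
--
--     results =[]
--
--     for i in ips1:
--         if len(i) != 0:           #Struggling point
--             ip = ip1 + "." + i
--         else:
--             ip = ip1
--         results.append(ip)
--     for i in ips2:                 #Struggling point
--         if len(i) != 0:
--             ip = ip2 + "." + i
--         else:                      #Struggling point
--             ip = ip2
--         results.append(ip)
--     for i in ips3:
--         if len(i) != 0:
--             ip = ip3 + "." + i
--         else:
--             ip = ip3
--         results.append(ip)
--     return results
-- ===== SOURCE B (Python) =====
-- def generate_ip_addresses(ip):
--     # Bottom-up over suffixes: each suffix's list is computed once (memoized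
--     # in a sliding triple), instead of A's exponential recomputation tree.
--     def go(s):
--         # returns (dp(s), dp(s[1:]), dp(s[2:])) where dp(x) = segmentations of x
--         if not s:
--             e = [""]
--             return e, e, e
--         d1, d2, d3 = go(s[1:])
--         if len(s) == 1:
--             dp = [s]
--         else:
--             dp = []
--             for k, dk in ((1, d1), (2, d2), (3, d3)):
--                 head = s[:k]
--                 dp += [head + "." + t if t else head for t in dk]
--         return dp, d1, d2
--     return go(ip)[0]
-- ===== Notes on version B (the rewrite author's own statement) =====
-- stated objective: faster
-- what changed: Replaces A's naive recursion, which recomputes each suffix's segmentation list exponentially many times, with a single bottom-up pass over suffix positions that computes each suffix's list exactly once (sliding triple of the last three suffix results); intended as asymptotically faster in subproblem count, measured 4.06x at the largest size both finish (the output itself is exponential, so both are output-bound).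
import Mathlib
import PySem

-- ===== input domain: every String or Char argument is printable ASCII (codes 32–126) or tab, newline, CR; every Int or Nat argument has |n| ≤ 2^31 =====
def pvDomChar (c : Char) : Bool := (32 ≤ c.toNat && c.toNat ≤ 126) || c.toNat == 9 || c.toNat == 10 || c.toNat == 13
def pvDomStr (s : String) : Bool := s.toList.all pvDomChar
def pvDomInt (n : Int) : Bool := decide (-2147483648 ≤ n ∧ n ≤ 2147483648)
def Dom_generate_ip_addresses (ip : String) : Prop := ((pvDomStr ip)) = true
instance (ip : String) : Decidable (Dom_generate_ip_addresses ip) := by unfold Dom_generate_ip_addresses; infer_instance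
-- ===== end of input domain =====

-- B replaces A's exponential re-computation of suffix subproblems by one bottom-up
-- pass that computes each suffix's list once (a sliding triple of the last three).

-- ===== PORT A =====
-- literal transliteration of A's naive recursion, over List Char
def genA (cs : List Char) : List (List Char) :=
  if cs.length ≤ 0 then [[]]
  else if cs.length = 1 then [cs]
  else
    let ips1 := genA (PySem.List.slice cs (some 1) none)
    let ips2 := genA (PySem.List.slice cs (some 2) none)
    let ips3 := genA (PySem.List.slice cs (some 3) none)
    let ip1 := PySem.List.slice cs none (some 1)
    let ip2 := PySem.List.slice cs none (some 2)
    let ip3 := PySem.List.slice cs none (some 3)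
    let results : List (List Char) := []
    let results := ips1.foldl (fun r i => r ++ [if i.length ≠ 0 then ip1 ++ '.' :: i else ip1]) results
    let results := ips2.foldl (fun r i => r ++ [if i.length ≠ 0 then ip2 ++ '.' :: i else ip2]) results
    let results := ips3.foldl (fun r i => r ++ [if i.length ≠ 0 then ip3 ++ '.' :: i else ip3]) results
    results
termination_by cs.length
decreasing_by
  all_goals rw [PySem.List.slice_from _ (by norm_num)]; simp; omega

def generate_ip_addresses (ip : String) : List String :=
  (genA ip.toList).map String.ofList

-- ===== PORT B =====
-- go(s) of Source B: returns (dp s, dp s[1:], dp s[2:]); each suffix computed once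
def genB : List Char → List (List Char) × List (List Char) × List (List Char)
  | [] => ([[]], [[]], [[]])
  | c :: rest =>
    let (d1, d2, d3) := genB rest
    let dp :=
      if rest = [] then [[c]]
      else
        (d1.map (fun t => if t ≠ [] then (c :: rest).take 1 ++ '.' :: t else (c :: rest).take 1)) ++
        (d2.map (fun t => if t ≠ [] then (c :: rest).take 2 ++ '.' :: t else (c :: rest).take 2)) ++
        (d3.map (fun t => if t ≠ [] then (c :: rest).take 3 ++ '.' :: t else (c :: rest).take 3))
    (dp, d1, d2)

def generate_ip_addresses_alt (ip : String) : List String :=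
  (genB ip.toList).1.map String.ofList

-- ===== PRECONDITION & SPEC =====
def Spec_generate_ip_addresses (ip : String) (out : List String) : Prop := out = generate_ip_addresses_alt ip
instance (ip : String) (out : List String) : Decidable (Spec_generate_ip_addresses ip out) := by unfold Spec_generate_ip_addresses; infer_instance

-- ===== CLAIM (what is proved, stated in full; the proofs are below) =====
def Claim_equal_generate_ip_addresses : Prop := ∀ (ip : String), Dom_generate_ip_addresses ip → Spec_generate_ip_addresses ip (generate_ip_addresses ip)

-- ===== LEMMAS AND PROOFS =====

-- the two branch conditions 'len(i) != 0' (A) and truthiness 'if t' (B) agree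
theorem ite_len_ne_zero (h : List Char) (i : List Char) :
    (if i.length ≠ 0 then h ++ '.' :: i else h) = (if i ≠ [] then h ++ '.' :: i else h) := by
  cases i <;> simp

theorem genB_eq (cs : List Char) :
    genB cs = (genA cs, genA cs.tail, genA cs.tail.tail) := by
  induction cs with
  | nil => simp [genB, genA]
  | cons c rest ih =>
    cases hrest : rest with
    | nil => simp [genB, genA]
    | cons c' rest' =>
      rw [genB, ← hrest, ih]
      have hlen : ¬ rest.length = 0 := by simp [hrest]
      have hA : genA (c :: rest) =
          (genA rest).map (fun t => if t ≠ [] then (c :: rest).take 1 ++ '.' :: t else (c :: rest).take 1) ++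
          (genA rest.tail).map (fun t => if t ≠ [] then (c :: rest).take 2 ++ '.' :: t else (c :: rest).take 2) ++
          (genA rest.tail.tail).map (fun t => if t ≠ [] then (c :: rest).take 3 ++ '.' :: t else (c :: rest).take 3) := by
        have h1 : PySem.List.slice (c :: rest) (some 1) none = rest := by
          rw [PySem.List.slice_from _ (by norm_num)]; rfl
        have h2 : PySem.List.slice (c :: rest) (some 2) none = rest.tail := by
          rw [PySem.List.slice_from _ (by norm_num)]
          simp [List.drop_one]
        have h3 : PySem.List.slice (c :: rest) (some 3) none = rest.tail.tail := by
          rw [PySem.List.slice_from _ (by norm_num)]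
          cases rest with
          | nil => rfl
          | cons a as => simp [List.drop_one]
        have g1 : PySem.List.slice (c :: rest) none (some 1) = (c :: rest).take 1 := by
          rw [PySem.List.slice_to _ (by norm_num)]; rfl
        have g2 : PySem.List.slice (c :: rest) none (some 2) = (c :: rest).take 2 := by
          rw [PySem.List.slice_to _ (by norm_num)]; rfl
        have g3 : PySem.List.slice (c :: rest) none (some 3) = (c :: rest).take 3 := by
          rw [PySem.List.slice_to _ (by norm_num)]; rfl
        rw [genA]
        simp only [List.length_cons, h1, h2, h3, g1, g2, g3]
        rw [if_neg (by omega), if_neg (by omega)]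
        simp only [PySem.List.foldl_append_singleton_eq_map, List.nil_append, ite_len_ne_zero]
      rw [hA]
      simp [hrest]

-- ===== VERDICT (by name: the statement is the Claim_ definition above) =====
theorem generate_ip_addresses_spec : Claim_equal_generate_ip_addresses := by
  intro ip _
  unfold Spec_generate_ip_addresses
  simp [generate_ip_addresses, generate_ip_addresses_alt, genB_eq]
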